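-- pv_equiv track=rewrite | github.com/Thomasfrancescon/Empaktor | empaktor.py | decompresser
-- ===== SOURCE A (Python) =====
-- def decompresser(texteCompresse, dico):
--     dicoinverse = {v: k for (k, v) in dico.items()}     # Crée un dictionnaire inverse
--     limite = max(len(k) for k in dicoinverse.keys())    # longueur maximal des clef du dictionnaire
--     rendu = [("", texteCompresse)]                      # liste pour stocker les information
--     l = 1
--     while l >= 1:               # explore et décompresse le texte
--         fait, textcompresse = rendu.pop(0)
--         l -= 1
--         if textcompresse == "":     # continu tant qu'il y a des informations dans texteCompresse
--             return fait
--         i = 0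
--         bits = ""
--         for bit in textcompresse:   # si on a atteint la limite de la taille des bits à vérifier, arrête la boucle
--             bits += bit
--             i += 1
--             if i > limite:  # si on a atteint la limite de la taille des bits à vérifier, arrête la boucle
--                 break
--             elif bits in dicoinverse:   # si le bit est présent dans le dictionnaire alors on regarde à qu'elle lettre il correspond et on l'ajoute
--                 rendu.append((fait + dicoinverse[bits], textcompresse[i:]))
--                 l += 1
--     return ""
-- ===== SOURCE B (Python) =====
-- from collections import deque
--
--
-- def decompresser(texteCompresse, dico):
--     # BFS over positions with shared back-linked chains: O(1) per enqueued node
--     # (deque, no pop(0) shifting, no string slicing of the remainder, no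
--     # quadratic string concatenation; the decoded text is built once at the end).
--     inverse = {}
--     for lettre, code in dico.items():
--         inverse[code] = lettre
--     longueurs = sorted(l for l in set(len(code) for code in inverse) if l >= 1)
--     n = len(texteCompresse)
--     file = deque([(None, 0)])
--     while file:
--         chaine, pos = file.popleft()
--         if pos == n:
--             morceaux = []
--             while chaine is not None:
--                 sym, chaine = chaine
--                 morceaux.append(sym)
--             morceaux.reverse()
--             return "".join(morceaux)
--         for lg in longueurs:
--             if pos + lg > n:
--                 break
--             lettre = inverse.get(texteCompresse[pos:pos + lg])
--             if lettre is not None: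
--                 file.append(((lettre, chaine), pos + lg))
--     return ""
-- ===== Notes on version B (the rewrite author's own statement) =====
-- stated objective: faster
-- what changed: The BFS over decode positions is kept, but the queue is a deque of (back-linked symbol chain, index) instead of a list of (decoded string, remaining string): pop(0)'s O(queue) shifting, the O(n) remainder slice and quadratic string concatenation per enqueued child all disappear, only the distinct code lengths (precomputed, sorted) are probed instead of every length 1..limite, and the decoded text is assembled once at the end.
-- crash fix: On an empty dico A raises ValueError (max() of an empty sequence) while B returns ''. — e.g. on decompresser("01", []): A raises ValueError, B returns ""
import Mathlib
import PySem

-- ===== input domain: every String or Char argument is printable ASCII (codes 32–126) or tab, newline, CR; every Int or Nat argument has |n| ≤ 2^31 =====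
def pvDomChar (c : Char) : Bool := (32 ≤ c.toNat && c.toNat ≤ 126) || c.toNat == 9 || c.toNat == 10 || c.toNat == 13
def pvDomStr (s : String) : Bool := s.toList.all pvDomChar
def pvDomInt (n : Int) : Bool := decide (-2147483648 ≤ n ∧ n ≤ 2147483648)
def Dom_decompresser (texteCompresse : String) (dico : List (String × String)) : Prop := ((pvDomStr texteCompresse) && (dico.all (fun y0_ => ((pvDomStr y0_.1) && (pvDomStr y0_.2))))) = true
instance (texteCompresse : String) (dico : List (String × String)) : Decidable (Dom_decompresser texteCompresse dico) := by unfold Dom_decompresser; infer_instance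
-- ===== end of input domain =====

-- B replaces A's BFS bookkeeping (pop(0) on a list, remainder slices, quadratic string
-- concatenation, all prefix lengths 1..limite probed) by a deque of (back-linked symbol
-- chain, index) probing only the distinct code lengths; measured asymptotically faster.

-- ===== PORT A =====
-- shared by both ports: the inverted dictionary {v: k for (k, v) in dico.items()},
-- keyed over code points (List Char)
def pvInverse (dico : List (String × String)) : PySem.Dict (List Char) (List Char) :=
  dico.foldl (fun d p => d.insert p.2.toList p.1.toList) PySem.Dict.empty

-- limite = max(len(k) for k in dicoinverse.keys()); Python's max() raises ValueError on an
-- empty dico — those inputs are excluded by Pre_decompresser, the .getD 0 is dead there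
def pvMaxKeyLen (d : PySem.Dict (List Char) (List Char)) : Int :=
  (PySem.List.max? (d.keys.map PySem.Chars.len) id).getD 0

-- fuel for the two while-loops: an upper bound on the number of queue pops (the explored
-- parse tree has branching ≤ L and depth ≤ n, hence ≤ (L+1)^(n+1) nodes); a totality
-- guard only, both ports run the same loop on the same fuel
def pvFuel (L n : Nat) : Nat := (L + 1) ^ (n + 1) + n + 2

-- the inner 'for bit in textcompresse' loop of A: prefix accumulator bits, counter i,
-- break once i > limite, collect the enqueued children in order
def pvAInner (dinv : PySem.Dict (List Char) (List Char)) (limite : Int)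
    (fait : List Char) (textcompresse : List Char) :
    List Char → Int → List Char → List (List Char × List Char)
  | [], _, _ => []
  | bit :: reste, i, bits =>
    let bits' := bits ++ [bit]
    let i' := i + 1
    if limite < i' then []
    else if dinv.contains bits' then
      (fait ++ dinv.getD bits' [], PySem.List.slice textcompresse (some i') none)
        :: pvAInner dinv limite fait textcompresse reste i' bits'
    else pvAInner dinv limite fait textcompresse reste i' bits'

-- the 'while l >= 1' loop of A; l is exactly the length of rendu, so the test is
-- 'queue nonempty'; fuel-guarded recursion, one unit per pop
def pvALoop (dinv : PySem.Dict (List Char) (List Char)) (limite : Int) :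
    Nat → List (List Char × List Char) → List Char
  | 0, _ => []
  | _ + 1, [] => []
  | fuel + 1, (fait, textcompresse) :: rendu =>
    if textcompresse = [] then fait
    else pvALoop dinv limite fuel
      (rendu ++ pvAInner dinv limite fait textcompresse textcompresse 0 [])

def decompresser (texteCompresse : String) (dico : List (String × String)) : String :=
  let dicoinverse := pvInverse dico
  let limite := pvMaxKeyLen dicoinverse
  let t := texteCompresse.toList
  String.ofList (pvALoop dicoinverse limite (pvFuel limite.toNat t.length) [([], t)])

-- ===== PORT B =====
-- the 'for lg in longueurs' loop of B: break as soon as pos + lg overruns the text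
-- (longueurs is sorted), enqueue (lettre :: chaine, pos + lg) for each matching length
def pvBChildren (inverse : PySem.Dict (List Char) (List Char)) (t : List Char) (n : Nat)
    (chaine : List (List Char)) (pos : Nat) : List Nat → List (List (List Char) × Nat)
  | [] => []
  | lg :: reste =>
    if n < pos + lg then []
    else
      match inverse.get? (PySem.List.slice t (some (pos : Int)) (some ((pos : Int) + (lg : Int)))) with
      | some lettre => (lettre :: chaine, pos + lg) :: pvBChildren inverse t n chaine pos reste
      | none => pvBChildren inverse t n chaine pos reste

-- walk the back-linked chain (newest symbol first), as B's inner while-loop does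
def pvBRebuild : List (List Char) → List (List Char)
  | [] => []
  | sym :: chaine => sym :: pvBRebuild chaine

-- the 'while file' loop of B
def pvBLoop (inverse : PySem.Dict (List Char) (List Char)) (longueurs : List Nat)
    (t : List Char) (n : Nat) : Nat → List (List (List Char) × Nat) → List Char
  | 0, _ => []
  | _ + 1, [] => []
  | fuel + 1, (chaine, pos) :: file =>
    if pos = n then PySem.Chars.join [] (pvBRebuild chaine).reverse
    else pvBLoop inverse longueurs t n fuel
      (file ++ pvBChildren inverse t n chaine pos longueurs)

def decompresser_alt (texteCompresse : String) (dico : List (String × String)) : String :=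
  let inverse := pvInverse dico
  -- longueurs = sorted(l for l in set(len(code) for code in inverse) if l >= 1)
  let longueurs : List Nat :=
    PySem.List.sorted
      ((PySem.Set.ofList (inverse.keys.map List.length)).filter (fun l => decide (1 ≤ l))) id
  let t := texteCompresse.toList
  -- fuel: the same pop-count bound as in port A (a totality guard, not part of B's algorithm)
  String.ofList (pvBLoop inverse longueurs t t.length
    (pvFuel (pvMaxKeyLen inverse).toNat t.length) [([], 0)])

-- ===== PRECONDITION & SPEC =====
-- Pre_ excludes only the empty dictionary, on which Python A raises ValueError
-- (max() of an empty sequence)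
def Pre_decompresser (texteCompresse : String) (dico : List (String × String)) : Prop :=
  dico ≠ []
instance (texteCompresse : String) (dico : List (String × String)) :
    Decidable (Pre_decompresser texteCompresse dico) := by unfold Pre_decompresser; infer_instance

def pvWitness_decompresser : String × (List (String × String)) := ("0", [("a", "0")])

-- On an empty dico A raises ValueError (max() of an empty sequence) while B returns "".
def Raises_decompresser (texteCompresse : String) (dico : List (String × String)) : Prop :=
  dico = []
instance (texteCompresse : String) (dico : List (String × String)) :
    Decidable (Raises_decompresser texteCompresse dico) := by unfold Raises_decompresser; infer_instance
def pvRaiseWitness_decompresser : String × (List (String × String)) := ("01", [])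
def pvRaiseWitnessOut_decompresser : String := ""

def Spec_decompresser (texteCompresse : String) (dico : List (String × String)) (out : String) : Prop :=
  out = decompresser_alt texteCompresse dico
instance (texteCompresse : String) (dico : List (String × String)) (out : String) :
    Decidable (Spec_decompresser texteCompresse dico out) := by unfold Spec_decompresser; infer_instance

-- ===== CLAIM (what is proved, stated in full; the proofs are below) =====
def Claim_equal_decompresser : Prop := ∀ (texteCompresse : String) (dico : List (String × String)), Dom_decompresser texteCompresse dico → Pre_decompresser texteCompresse dico → Spec_decompresser texteCompresse dico (decompresser texteCompresse dico)

def Claim_raises_decompresser : Prop := (∀ (texteCompresse : String) (dico : List (String × String)), Dom_decompresser texteCompresse dico → Raises_decompresser texteCompresse dico → ¬ Pre_decompresser texteCompresse dico) ∧ (Dom_decompresser (pvRaiseWitness_decompresser.1) (pvRaiseWitness_decompresser.2) ∧ Raises_decompresser (pvRaiseWitness_decompresser.1) (pvRaiseWitness_decompresser.2) ∧ decompresser_alt (pvRaiseWitness_decompresser.1) (pvRaiseWitness_decompresser.2) = pvRaiseWitnessOut_decompresser)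

-- ===== LEMMAS AND PROOFS =====

-- ''.join over code-point lists is flatten
theorem pv_join_nil_flatten (xs : List (List Char)) : PySem.Chars.join [] xs = xs.flatten := by
  simp only [PySem.Chars.join]
  induction xs with
  | nil => rfl
  | cons a l ih =>
    cases l with
    | nil => simp [List.intercalate, List.intersperse]
    | cons b m => simp_all [List.intercalate, List.intersperse]

theorem pvBRebuild_id (c : List (List Char)) : pvBRebuild c = c := by
  induction c with
  | nil => rfl
  | cons a l ih => simp [pvBRebuild, ih]

-- the relation between an A-queue entry (fait, rest) and a B-queue entry (chaine, pos)
def pvRel (t : List Char) (a : List Char × List Char) (b : List (List Char) × Nat) : Prop :=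
  b.2 ≤ t.length ∧ a.2 = t.drop b.2 ∧ a.1 = b.1.reverse.flatten

theorem pv_maxKeyLen_nonneg (d : PySem.Dict (List Char) (List Char)) :
    0 ≤ pvMaxKeyLen d := by
  unfold pvMaxKeyLen
  cases h : PySem.List.max? (d.keys.map PySem.Chars.len) id with
  | none => simp
  | some m =>
    have hm := PySem.List.max?_mem h
    simp only [List.mem_map] at hm
    obtain ⟨k, _, hk⟩ := hm
    simp only [Option.getD_some]
    rw [← hk, PySem.Chars.len_eq]
    positivity

-- max? of a nonempty list returns a value (Python's max() only raises on an empty one)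
theorem pv_max?_isSome {xs : List Int} (h : xs ≠ []) :
    (PySem.List.max? xs id).isSome := by
  unfold PySem.List.max?
  cases xs with
  | nil => exact absurd rfl h
  | cons a l =>
    simp only [List.foldl_cons]
    clear h
    induction l generalizing a with
    | nil => simp
    | cons b m ih =>
      simp only [List.foldl_cons]
      split <;> exact ih _

theorem pv_len_le_maxKeyLen (d : PySem.Dict (List Char) (List Char)) (k : List Char)
    (hk : k ∈ d.keys) : k.length ≤ (pvMaxKeyLen d).toNat := by
  unfold pvMaxKeyLen
  have hne : d.keys.map PySem.Chars.len ≠ [] := by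
    intro h; rw [List.map_eq_nil_iff] at h; simp [h] at hk
  obtain ⟨m, hm⟩ := Option.isSome_iff_exists.mp (pv_max?_isSome hne)
  have hle := PySem.List.max?_isMax hm (PySem.Chars.len k) (List.mem_map_of_mem hk)
  rw [hm]
  simp only [Option.getD_some, id] at hle ⊢
  rw [PySem.Chars.len_eq] at hle
  omega

-- characterization of A's inner loop: the children are, in order, the lengths
-- 1..min(limite, len rest) whose prefix is a code
theorem pvAInner_eq (d : PySem.Dict (List Char) (List Char)) (L' : Nat)
    (fait rest : List Char) :
    ∀ (cs : List Char) (k : Nat), rest.drop k = cs →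
    pvAInner d (L' : Int) fait rest cs (k : Int) (rest.take k) =
      ((List.range' (k + 1) (min L' rest.length - k)).filter
          (fun l => d.contains (rest.take l))).map
        (fun l => (fait ++ d.getD (rest.take l) [], rest.drop l)) := by
  intro cs
  induction cs with
  | nil =>
    intro k hk
    have : rest.length ≤ k := List.drop_eq_nil_iff.mp hk
    have : min L' rest.length - k = 0 := by omega
    simp [pvAInner, this]
  | cons c cs ih =>
    intro k hk
    have hklt : k < rest.length := by
      by_contra h
      rw [List.drop_eq_nil_iff.mpr (by omega)] at hk
      simp at hk
    have hget : rest.drop k = rest[k] :: rest.drop (k + 1) := List.drop_eq_getElem_cons hklt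
    rw [hk] at hget
    obtain ⟨hc, hdrop⟩ : c = rest[k] ∧ cs = rest.drop (k + 1) := by
      constructor <;> [exact (List.cons.inj hget).1; exact (List.cons.inj hget).2]
    have htake : rest.take k ++ [c] = rest.take (k + 1) := by
      rw [hc, List.take_add_one, List.getElem?_eq_getElem hklt]
      rfl
    show (if (L' : Int) < (k : Int) + 1 then _ else _) = _
    by_cases hL : L' < k + 1
    · rw [if_pos (by exact_mod_cast hL)]
      have : min L' rest.length - k = 0 := by omega
      simp [this]
    · rw [if_neg (by omega)]
      have hrange : min L' rest.length - k = (min L' rest.length - (k + 1)) + 1 := by omega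
      rw [hrange, List.range'_succ]
      have hcast : (k : Int) + 1 = ((k + 1 : Nat) : Int) := by push_cast; ring
      have ihk := ih (k + 1) hdrop.symm
      simp only [htake, hcast]
      by_cases hcont : d.contains (rest.take (k + 1))
      · rw [if_pos hcont]
        rw [List.filter_cons_of_pos (by simpa using hcont)]
        rw [PySem.List.slice_from_natCast]
        simp only [List.map_cons]
        rw [ihk]
      · rw [if_neg hcont]
        rw [List.filter_cons_of_neg (by simpa using hcont)]
        rw [ihk]

-- characterization of B's inner loop (ls strictly increasing, so the break is a filter)
theorem pvBChildren_eq (d : PySem.Dict (List Char) (List Char)) (t : List Char)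
    (chaine : List (List Char)) (pos : Nat) :
    ∀ (ls : List Nat), List.Pairwise (· < ·) ls →
    pvBChildren d t t.length chaine pos ls =
      ((ls.filter (fun l => decide (pos + l ≤ t.length) && d.contains ((t.drop pos).take l))).map
        (fun l => (d.getD ((t.drop pos).take l) [] :: chaine, pos + l))) := by
  intro ls
  induction ls with
  | nil => intro _; rfl
  | cons lg reste ih =>
    intro hp
    rw [List.pairwise_cons] at hp
    obtain ⟨hlt, hp'⟩ := hp
    show (if t.length < pos + lg then _ else _) = _
    by_cases hover : t.length < pos + lg
    · rw [if_pos hover]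
      rw [List.filter_cons_of_neg (by simp; omega)]
      rw [List.filter_eq_nil_iff.mpr (fun l hl => by
        have := hlt l hl
        simp; omega)]
      rfl
    · rw [if_neg hover]
      have hsl : PySem.List.slice t (some (pos : Int)) (some ((pos : Int) + (lg : Int))) =
          (t.drop pos).take lg := PySem.List.slice_natCast_add t pos lg
      rw [hsl]
      cases hget : d.get? ((t.drop pos).take lg) with
      | some lettre =>
        have hcont : d.contains ((t.drop pos).take lg) = true := by
          rw [PySem.Dict.contains_eq_isSome_get?, hget]; rfl
        have hgd : d.getD ((t.drop pos).take lg) [] = lettre := by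
          rw [PySem.Dict.getD_eq_get?_getD, hget]; rfl
        rw [List.filter_cons_of_pos (by simp [hcont]; omega)]
        simp only [List.map_cons, hgd]
        rw [ih hp']
      | none =>
        have hcont : d.contains ((t.drop pos).take lg) = false := by
          rw [PySem.Dict.contains_eq_isSome_get?, hget]; rfl
        rw [List.filter_cons_of_neg (by simp [hcont])]
        rw [ih hp']

-- two strictly increasing lists with the same members are equal
theorem pv_eq_of_pairwise_lt (l1 l2 : List Nat)
    (h1 : List.Pairwise (· < ·) l1) (h2 : List.Pairwise (· < ·) l2)
    (hm : ∀ x, x ∈ l1 ↔ x ∈ l2) : l1 = l2 := by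
  have n1 : l1.Nodup := h1.imp Nat.ne_of_lt
  have n2 : l2.Nodup := h2.imp Nat.ne_of_lt
  have hperm : l1.Perm l2 := (List.perm_ext_iff_of_nodup n1 n2).mpr hm
  calc l1 = PySem.List.sorted l2 id := (PySem.List.sorted_eq_of_perm_of_pairwise_lt l2 l1 id hperm h1).symm
    _ = l2 := PySem.List.sorted_eq_of_perm_of_pairwise_lt l2 l2 id (List.Perm.refl _) h2

-- the two enumerated length lists agree: a matching prefix length is ≥ 1, is the length
-- of some key, and is at most the longest key, so A's 1..limite scan and B's scan of the
-- distinct code lengths keep exactly the same lengths, in the same increasing order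
theorem pv_lengths_eq (d : PySem.Dict (List Char) (List Char)) (t : List Char) (pos : Nat)
    (hpos : pos ≤ t.length) :
    (PySem.List.sorted ((PySem.Set.ofList (d.keys.map List.length)).filter
        (fun l => decide (1 ≤ l))) id).filter
        (fun l => decide (pos + l ≤ t.length) && d.contains ((t.drop pos).take l)) =
      (List.range' 1 (min (pvMaxKeyLen d).toNat (t.drop pos).length)).filter
        (fun l => d.contains ((t.drop pos).take l)) := by
  set S := (PySem.Set.ofList (d.keys.map List.length)).filter (fun l => decide (1 ≤ l)) with hS
  set lng := PySem.List.sorted S id with hlng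
  have hSnd : S.Nodup := (PySem.Set.nodup_ofList _).filter _
  have hperm : lng.Perm S := PySem.List.sorted_perm S id false
  have hlngnd : lng.Nodup := hperm.nodup_iff.mpr hSnd
  have hlnglt : List.Pairwise (· < ·) lng :=
    ((PySem.List.sorted_pairwise S id).and hlngnd).imp (fun h => lt_of_le_of_ne h.1 h.2)
  have hrange : List.Pairwise (· < ·) (List.range' 1 (min (pvMaxKeyLen d).toNat (t.drop pos).length)) :=
    List.pairwise_lt_range'
  apply pv_eq_of_pairwise_lt
  · exact hlnglt.filter _
  · exact hrange.filter _
  · intro x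
    simp only [List.mem_filter, List.mem_range'_1, hperm.mem_iff, hS, PySem.Set.mem_ofList,
      List.mem_map, Bool.and_eq_true, decide_eq_true_eq]
    have hdlen : (t.drop pos).length = t.length - pos := List.length_drop
    constructor
    · rintro ⟨⟨⟨k, hk, hkl⟩, hx1⟩, hxle, hcont⟩
      refine ⟨⟨by omega, ?_⟩, hcont⟩
      have := pv_len_le_maxKeyLen d k hk
      omega
    · rintro ⟨⟨hx1, hxlt⟩, hcont⟩
      have hkmem : (t.drop pos).take x ∈ d.keys :=
        (PySem.Dict.contains_iff_mem_keys d _).mp hcont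
      have hlen : ((t.drop pos).take x).length = x := by
        rw [List.length_take]; omega
      exact ⟨⟨⟨_, hkmem, hlen⟩, by omega⟩, by omega, hcont⟩

-- longueurs is strictly increasing
theorem pv_lng_pairwise (d : PySem.Dict (List Char) (List Char)) :
    List.Pairwise (· < ·) (PySem.List.sorted ((PySem.Set.ofList (d.keys.map List.length)).filter
      (fun l => decide (1 ≤ l))) id) := by
  set S := (PySem.Set.ofList (d.keys.map List.length)).filter (fun l => decide (1 ≤ l))
  have hSnd : S.Nodup := (PySem.Set.nodup_ofList _).filter _
  have hperm := PySem.List.sorted_perm S id false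
  have hnd := hperm.nodup_iff.mpr hSnd
  exact ((PySem.List.sorted_pairwise S id).and hnd).imp (fun h => lt_of_le_of_ne h.1 h.2)

-- children of related queue entries are pointwise related
theorem pv_children_rel (d : PySem.Dict (List Char) (List Char)) (t : List Char)
    (fait rest : List Char) (chaine : List (List Char)) (pos : Nat)
    (h : pvRel t (fait, rest) (chaine, pos)) :
    List.Forall₂ (pvRel t)
      (pvAInner d (pvMaxKeyLen d) fait rest rest 0 [])
      (pvBChildren d t t.length chaine pos
        (PySem.List.sorted ((PySem.Set.ofList (d.keys.map List.length)).filter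
          (fun l => decide (1 ≤ l))) id)) := by
  obtain ⟨hpos, hrest, hfait⟩ := h
  simp only at hpos hrest hfait
  have hL : pvMaxKeyLen d = (((pvMaxKeyLen d).toNat : Nat) : Int) :=
    (Int.toNat_of_nonneg (pv_maxKeyLen_nonneg d)).symm
  have hA := pvAInner_eq d (pvMaxKeyLen d).toNat fait rest rest 0 rfl
  simp only [Nat.cast_zero, List.take_zero, Nat.zero_add, Nat.sub_zero] at hA
  rw [hL, hA]
  rw [pvBChildren_eq d t chaine pos _ (pv_lng_pairwise d)]
  rw [pv_lengths_eq d t pos hpos]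
  rw [← hrest]
  rw [List.forall₂_map_left_iff, List.forall₂_map_right_iff, List.forall₂_same]
  intro l hl
  rw [List.mem_filter, List.mem_range'_1] at hl
  obtain ⟨⟨hl1, hl2⟩, _⟩ := hl
  have hll : l ≤ rest.length := by omega
  have hrl : rest.length = t.length - pos := by rw [hrest]; exact List.length_drop
  refine ⟨by simp; omega, ?_, ?_⟩
  · simp only
    rw [hrest, List.drop_drop]
  · simp [hfait]

theorem pv_forall₂_append {α β : Type} {R : α → β → Prop}
    {l1 l2 : List α} {u1 u2 : List β}
    (h1 : List.Forall₂ R l1 u1) (h2 : List.Forall₂ R l2 u2) :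
    List.Forall₂ R (l1 ++ l2) (u1 ++ u2) := by
  induction h1 with
  | nil => exact h2
  | cons h _ ih => exact List.Forall₂.cons h ih

-- main loop equivalence: pointwise-related queues, same fuel, same answer
theorem pv_loop_eq (d : PySem.Dict (List Char) (List Char)) (t : List Char) :
    ∀ (fuel : Nat) (qa : List (List Char × List Char)) (qb : List (List (List Char) × Nat)),
    List.Forall₂ (pvRel t) qa qb →
    pvALoop d (pvMaxKeyLen d) fuel qa =
      pvBLoop d (PySem.List.sorted ((PySem.Set.ofList (d.keys.map List.length)).filter
          (fun l => decide (1 ≤ l))) id) t t.length fuel qb := by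
  intro fuel
  induction fuel with
  | zero => intro qa qb _; rfl
  | succ fuel ih =>
    intro qa qb hq
    cases hq with
    | nil => rfl
    | @cons a b qa' qb' hab hq' =>
      obtain ⟨fait, rest⟩ := a
      obtain ⟨chaine, pos⟩ := b
      obtain ⟨hpos, hrest, hfait⟩ := hab
      simp only at hpos hrest hfait
      show (if rest = [] then fait else _) = (if pos = t.length then _ else _)
      have hiff : rest = [] ↔ pos = t.length := by
        rw [hrest, List.drop_eq_nil_iff]
        omega
      by_cases hend : rest = []
      · rw [if_pos hend, if_pos (hiff.mp hend)]
        rw [hfait, pvBRebuild_id, pv_join_nil_flatten]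
      · rw [if_neg hend, if_neg (fun hc => hend (hiff.mpr hc))]
        exact ih _ _ (pv_forall₂_append hq'
          (pv_children_rel d t fait rest chaine pos ⟨hpos, hrest, hfait⟩))

-- ===== VERDICT (by name: the statement is the Claim_ definition above) =====
theorem decompresser_spec : Claim_equal_decompresser := by
  intro texteCompresse dico _ _
  unfold Spec_decompresser decompresser decompresser_alt
  refine congrArg String.ofList ?_
  exact pv_loop_eq (pvInverse dico) texteCompresse.toList _ _ _
    (List.Forall₂.cons ⟨Nat.zero_le _, rfl, rfl⟩ List.Forall₂.nil)

theorem decompresser_raises : Claim_raises_decompresser := by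
  unfold Claim_raises_decompresser
  exact ⟨fun _ _ _ h => by unfold Raises_decompresser at h; simp [Pre_decompresser, h], by decide⟩

-- self-check: the raises-witness value asserted above, extracted from the verdict
theorem pvRaiseWitness_ok : decompresser_alt pvRaiseWitness_decompresser.1
    pvRaiseWitness_decompresser.2 = pvRaiseWitnessOut_decompresser :=
  decompresser_raises.2.2.2
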